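-- pv_equiv track=rewrite | github.com/AASHRITH1903/PR_Desc_Sum | Preprocess/build_graph.py | extract_changes
-- ===== SOURCE A (Python) =====
-- def extract_changes(patch):
--     patch_lines = patch.split('\n')
--     changes = []
--     plus_lines = ""
--     minus_lines = ""
--     flag = False
--     for line in patch_lines:
--         if line.startswith('-'):
--             minus_lines += line[1:] + '\n'
--             flag = True
--         elif line.startswith('+'):
--             plus_lines += line[1:] + '\n'
--             flag = True
--         else:
--             if flag:
--                 changes.append((minus_lines, plus_lines))
--                 minus_lines = ""
--                 plus_lines = ""
--                 flag = False
--
--     if flag: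
--         changes.append((minus_lines, plus_lines))
--         minus_lines = ""
--         plus_lines = ""
--         flag = False
--
--     return changes
-- ===== SOURCE B (Python) =====
-- def extract_changes(patch):
--     lines = patch.split('\n')
--     changes = []
--     i, n = 0, len(lines)
--     while i < n:
--         if lines[i].startswith(('+', '-')):
--             j = i
--             while j < n and lines[j].startswith(('+', '-')):
--                 j += 1
--             block = lines[i:j]
--             minus = ''.join(l[1:] + '\n' for l in block if l.startswith('-'))
--             plus = ''.join(l[1:] + '\n' for l in block if l.startswith('+'))
--             changes.append((minus, plus))
--             i = j
--         else:
--             i += 1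
--     return changes
-- ===== Notes on version B (the rewrite author's own statement) =====
-- stated objective: alternative
-- what changed: Replaces the single stateful pass (two growing accumulator strings plus a flag with a trailing flush) by run-detection: scan for maximal consecutive runs of +/- lines, and build each change pair from its block with two filtered joins, so no flag or end-of-loop flush exists.
import Mathlib
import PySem

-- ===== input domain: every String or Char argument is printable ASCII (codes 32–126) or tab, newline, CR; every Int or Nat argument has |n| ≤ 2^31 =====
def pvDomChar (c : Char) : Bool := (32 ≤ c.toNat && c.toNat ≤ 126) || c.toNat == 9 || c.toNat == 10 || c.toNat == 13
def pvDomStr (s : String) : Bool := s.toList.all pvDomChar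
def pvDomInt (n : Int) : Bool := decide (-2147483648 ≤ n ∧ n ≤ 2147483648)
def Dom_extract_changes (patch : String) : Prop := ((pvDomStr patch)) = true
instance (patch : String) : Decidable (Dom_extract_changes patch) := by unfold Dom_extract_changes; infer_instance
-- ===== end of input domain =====

-- B replaces A's single stateful pass (two accumulator strings + a flag with a trailing flush)
-- by run-detection: each maximal consecutive run of '+'/'-' lines becomes one change pair,
-- built with two filtered joins; same O(n) cost, different decomposition.


-- ===== PORT A =====
-- loop body of A's for-loop; state = (changes, plus_lines, minus_lines, flag)
def pvStepA (st : List (String × String) × List Char × List Char × Bool)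
    (line : List Char) : List (String × String) × List Char × List Char × Bool :=
  let (changes, plus_lines, minus_lines, flag) := st
  if PySem.Chars.startswith line ['-'] then
    (changes, plus_lines, minus_lines ++ (PySem.List.slice line (some 1) none ++ ['\n']), true)
  else if PySem.Chars.startswith line ['+'] then
    (changes, plus_lines ++ (PySem.List.slice line (some 1) none ++ ['\n']), minus_lines, true)
  else if flag then
    (changes ++ [(String.ofList minus_lines, String.ofList plus_lines)], [], [], false)
  else
    (changes, plus_lines, minus_lines, flag)

def extract_changes (patch : String) : List (String × String) :=
  let patch_lines := PySem.Chars.splitOn patch.toList ['\n']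
  let st := patch_lines.foldl pvStepA ([], [], [], false)
  if st.2.2.2 then st.1 ++ [(String.ofList st.2.2.1, String.ofList st.2.1)] else st.1

-- ===== PORT B =====
def pvIsPM (line : List Char) : Bool :=
  PySem.Chars.startswith line ['+'] || PySem.Chars.startswith line ['-']

-- ''.join(l[1:] + '\n' for l in block if l.startswith(c))
def pvBlockJoin (c : Char) (block : List (List Char)) : List Char :=
  PySem.Chars.join []
    ((block.filter (fun l => PySem.Chars.startswith l [c])).map
      (fun l => PySem.List.slice l (some 1) none ++ ['\n']))

-- outer while-loop of B: skip non-change lines, peel one maximal +/- run at a time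
def extract_changes_go : List (List Char) → List (String × String)
  | [] => []
  | l :: rest =>
    if pvIsPM l then
      (String.ofList (pvBlockJoin '-' (l :: rest.takeWhile pvIsPM)),
       String.ofList (pvBlockJoin '+' (l :: rest.takeWhile pvIsPM)))
        :: extract_changes_go (rest.dropWhile pvIsPM)
    else extract_changes_go rest
termination_by ls => ls.length
decreasing_by
  · exact Nat.lt_succ_of_le (List.length_dropWhile_le pvIsPM rest)
  · simp

def extract_changes_alt (patch : String) : List (String × String) :=
  extract_changes_go (PySem.Chars.splitOn patch.toList ['\n'])

-- ===== PRECONDITION & SPEC =====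
def Spec_extract_changes (patch : String) (out : List (String × String)) : Prop := out = extract_changes_alt patch
instance (patch : String) (out : List (String × String)) : Decidable (Spec_extract_changes patch out) := by unfold Spec_extract_changes; infer_instance

-- ===== CLAIM (what is proved, stated in full; the proofs are below) =====
def Claim_equal_extract_changes : Prop := ∀ (patch : String), Dom_extract_changes patch → Spec_extract_changes patch (extract_changes patch)

-- ===== LEMMAS AND PROOFS =====

-- A's loop, written as the recursion the fold performs (changes accumulator factored out)
def pvRunA : List (List Char) → List Char → List Char → Bool → List (String × String)
  | [], p, m, f => if f then [(String.ofList m, String.ofList p)] else []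
  | l :: t, p, m, f =>
    if PySem.Chars.startswith l ['-'] then
      pvRunA t p (m ++ (PySem.List.slice l (some 1) none ++ ['\n'])) true
    else if PySem.Chars.startswith l ['+'] then
      pvRunA t (p ++ (PySem.List.slice l (some 1) none ++ ['\n'])) m true
    else if f then
      (String.ofList m, String.ofList p) :: pvRunA t [] [] false
    else
      pvRunA t p m f

theorem pvFoldA_eq_runA (lines : List (List Char)) :
    ∀ (ch : List (String × String)) (p m : List Char) (f : Bool),
      (let st := lines.foldl pvStepA (ch, p, m, f);
       if st.2.2.2 then st.1 ++ [(String.ofList st.2.2.1, String.ofList st.2.1)] else st.1)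
      = ch ++ pvRunA lines p m f := by
  induction lines with
  | nil =>
    intro ch p m f
    cases f <;> simp [pvRunA]
  | cons l t ih =>
    intro ch p m f
    by_cases hm : PySem.Chars.startswith l ['-'] = true
    · simp only [List.foldl_cons, pvStepA, pvRunA, hm, if_pos]
      exact ih ch p (m ++ (PySem.List.slice l (some 1) none ++ ['\n'])) true
    · by_cases hp : PySem.Chars.startswith l ['+'] = true
      · simp only [List.foldl_cons, pvStepA, pvRunA, hm, hp, if_neg, if_pos,
          Bool.not_eq_true]
        exact ih ch (p ++ (PySem.List.slice l (some 1) none ++ ['\n'])) m true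
      · cases f with
        | false =>
          simp only [List.foldl_cons, pvStepA, pvRunA, hm, hp, Bool.not_eq_true, if_neg]
          exact ih ch p m false
        | true =>
          simp only [List.foldl_cons, pvStepA, pvRunA, hm, hp, Bool.not_eq_true,
            if_neg, if_true]
          rw [ih (ch ++ [(String.ofList m, String.ofList p)]) [] [] false]
          simp

theorem pvJoin_nil_cons (x : List Char) (xs : List (List Char)) :
    PySem.Chars.join [] (x :: xs) = x ++ PySem.Chars.join [] xs := by
  cases xs with
  | nil => simp [PySem.Chars.join, List.intercalate]
  | cons y ys =>
    have h := PySem.Chars.join_cons_cons [] x y ys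
    simpa using h

theorem pvBlockJoin_cons_pos {c : Char} {l : List Char}
    (h : PySem.Chars.startswith l [c] = true) (b : List (List Char)) :
    pvBlockJoin c (l :: b)
      = (PySem.List.slice l (some 1) none ++ ['\n']) ++ pvBlockJoin c b := by
  simp [pvBlockJoin, h, pvJoin_nil_cons]

theorem pvBlockJoin_cons_neg {c : Char} {l : List Char}
    (h : PySem.Chars.startswith l [c] = false) (b : List (List Char)) :
    pvBlockJoin c (l :: b) = pvBlockJoin c b := by
  simp [pvBlockJoin, h]

theorem pvNotPlus_of_minus {l : List Char}
    (h : PySem.Chars.startswith l ['-'] = true) :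
    PySem.Chars.startswith l ['+'] = false := by
  rw [PySem.Chars.startswith_iff] at h
  obtain ⟨t, rfl⟩ := h
  rw [Bool.eq_false_iff]
  intro hc
  rw [PySem.Chars.startswith_iff] at hc
  obtain ⟨u, hu⟩ := hc
  simp at hu

theorem pvMain (lines : List (List Char)) :
    (pvRunA lines [] [] false = extract_changes_go lines) ∧
    (∀ p m : List Char, pvRunA lines p m true =
      (String.ofList (m ++ pvBlockJoin '-' (lines.takeWhile pvIsPM)),
       String.ofList (p ++ pvBlockJoin '+' (lines.takeWhile pvIsPM)))
        :: extract_changes_go (lines.dropWhile pvIsPM)) := by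
  induction lines with
  | nil =>
    refine ⟨by simp [pvRunA, extract_changes_go], ?_⟩
    intro p m
    simp [pvRunA, extract_changes_go, pvBlockJoin]
  | cons l t ih =>
    obtain ⟨iha, ihb⟩ := ih
    by_cases hm : PySem.Chars.startswith l ['-'] = true
    · have hp : PySem.Chars.startswith l ['+'] = false := pvNotPlus_of_minus hm
      have hpm : pvIsPM l = true := by simp [pvIsPM, hm]
      constructor
      · rw [show pvRunA (l :: t) [] [] false
            = pvRunA t [] ([] ++ (PySem.List.slice l (some 1) none ++ ['\n'])) true by
              simp [pvRunA, hm]]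
        rw [ihb]
        simp [extract_changes_go, hpm, pvBlockJoin_cons_pos hm, pvBlockJoin_cons_neg hp]
      · intro p m
        rw [show pvRunA (l :: t) p m true
            = pvRunA t p (m ++ (PySem.List.slice l (some 1) none ++ ['\n'])) true by
              simp [pvRunA, hm]]
        rw [ihb]
        simp [List.dropWhile_cons, hpm, pvBlockJoin_cons_pos hm, pvBlockJoin_cons_neg hp]
    · by_cases hp : PySem.Chars.startswith l ['+'] = true
      · have hpm : pvIsPM l = true := by simp [pvIsPM, hp]
        have hm' : PySem.Chars.startswith l ['-'] = false := by
          simpa using hm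
        constructor
        · rw [show pvRunA (l :: t) [] [] false
              = pvRunA t ([] ++ (PySem.List.slice l (some 1) none ++ ['\n'])) [] true by
                simp [pvRunA, hm', hp]]
          rw [ihb]
          simp [extract_changes_go, hpm, pvBlockJoin_cons_pos hp, pvBlockJoin_cons_neg hm']
        · intro p m
          rw [show pvRunA (l :: t) p m true
              = pvRunA t (p ++ (PySem.List.slice l (some 1) none ++ ['\n'])) m true by
                simp [pvRunA, hm', hp]]
          rw [ihb]
          simp [List.dropWhile_cons, hpm, pvBlockJoin_cons_pos hp, pvBlockJoin_cons_neg hm']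
      · have hm' : PySem.Chars.startswith l ['-'] = false := by simpa using hm
        have hp' : PySem.Chars.startswith l ['+'] = false := by simpa using hp
        have hpm : pvIsPM l = false := by simp [pvIsPM, hm', hp']
        constructor
        · rw [show pvRunA (l :: t) [] [] false = pvRunA t [] [] false by
            simp [pvRunA, hm', hp']]
          rw [iha]
          simp [extract_changes_go, hpm]
        · intro p m
          rw [show pvRunA (l :: t) p m true
              = (String.ofList m, String.ofList p) :: pvRunA t [] [] false by
                simp [pvRunA, hm', hp']]
          rw [iha]
          simp [List.dropWhile_cons, hpm, extract_changes_go, pvBlockJoin]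

-- ===== VERDICT (by name: the statement is the Claim_ definition above) =====
theorem extract_changes_spec : Claim_equal_extract_changes := by
  intro patch _
  unfold Spec_extract_changes extract_changes extract_changes_alt
  rw [pvFoldA_eq_runA (PySem.Chars.splitOn patch.toList ['\n']) [] [] [] false]
  simp [(pvMain (PySem.Chars.splitOn patch.toList ['\n'])).1]
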